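-- pv_equiv track=rewrite | github.com/DanilaMulyarchik/4-semestr | AOIS/lab_2/handler_input_formula.py | handler_input_formula
-- ===== SOURCE A (Python) =====
-- def convert_for_list(formula):
--     rez = []
--     for i in formula:
--         rez.append(i)
--     return rez
--
-- def handler_input_formula(formula: str):
--     formula = convert_for_list(formula)
--     for i in range(len(formula)):
--         if formula[i] == '!':
--             formula[i] = ' not '
--         elif formula[i] == '+':
--             formula[i] = ' or '
--         elif formula[i] == '*':
--             formula[i] = ' and '
--     logic_formula = ''.join(formula)
--     return logic_formula
-- ===== SOURCE B (Python) =====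
-- def handler_input_formula(formula: str):
--     return formula.replace('!', ' not ').replace('+', ' or ').replace('*', ' and ')
-- ===== Notes on version B (the rewrite author's own statement) =====
-- stated objective: idiomatic
-- what changed: Replaces the list-copy helper plus indexed mutation loop and join with a chain of three str.replace library scans over the whole string.
import Mathlib
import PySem

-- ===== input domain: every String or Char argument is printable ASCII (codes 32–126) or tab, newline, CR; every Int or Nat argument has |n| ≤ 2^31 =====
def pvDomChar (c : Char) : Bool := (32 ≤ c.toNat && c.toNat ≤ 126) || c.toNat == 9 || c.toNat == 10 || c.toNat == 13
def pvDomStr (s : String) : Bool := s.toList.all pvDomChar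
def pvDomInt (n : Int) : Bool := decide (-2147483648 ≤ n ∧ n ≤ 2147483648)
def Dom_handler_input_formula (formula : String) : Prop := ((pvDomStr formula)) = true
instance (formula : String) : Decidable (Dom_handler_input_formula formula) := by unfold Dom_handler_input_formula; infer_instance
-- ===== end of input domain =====

-- B replaces A's list-copy + indexed mutation loop + join with a chain of three str.replace scans (idiomatic).

-- ===== PORT A =====
-- convert_for_list: appends each character (as a one-char string cell) to a fresh list
def convert_for_list (formula : String) : List String :=
  formula.toList.foldl (fun rez i => rez ++ [String.ofList [i]]) []

def handler_input_formula (formula : String) : String :=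
  let cells := convert_for_list formula
  -- for i in range(len(formula)): indexed in-place replacement = map over the cells
  let cells := cells.map (fun s =>
    if s = "!" then " not "
    else if s = "+" then " or "
    else if s = "*" then " and "
    else s)
  PySem.Str.join "" cells

-- ===== PORT B =====
def handler_input_formula_alt (formula : String) : String :=
  PySem.Str.replace (PySem.Str.replace (PySem.Str.replace formula "!" " not ") "+" " or ") "*" " and "

-- ===== PRECONDITION & SPEC =====
def Spec_handler_input_formula (formula : String) (out : String) : Prop := out = handler_input_formula_alt formula
instance (formula : String) (out : String) : Decidable (Spec_handler_input_formula formula out) := by unfold Spec_handler_input_formula; infer_instance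

-- ===== CLAIM (what is proved, stated in full; the proofs are below) =====
def Claim_equal_handler_input_formula : Prop := ∀ (formula : String), Dom_handler_input_formula formula → Spec_handler_input_formula formula (handler_input_formula formula)

-- ===== LEMMAS AND PROOFS =====

-- single-char replacement as flatMap
def substOne (c : Char) (new : List Char) (x : Char) : List Char :=
  if x = c then new else [x]

theorem replace_go_single (c : Char) (new : List Char) :
    ∀ (s : List Char) (fuel : Nat) (acc : List Char), s.length ≤ fuel →
      PySem.Chars.replace.go [c] new fuel s acc
        = acc.reverse ++ s.flatMap (substOne c new) := by
  intro s
  induction s with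
  | nil =>
    intro fuel acc _
    cases fuel <;> simp [PySem.Chars.replace.go]
  | cons x t ih =>
    intro fuel acc h
    cases fuel with
    | zero => simp at h
    | succ n =>
      simp only [PySem.Chars.replace.go]
      by_cases hx : x = c
      · subst hx
        have : List.isPrefixOf [x] (x :: t) = true := by
          simp [List.isPrefixOf]
        rw [if_pos this]
        simp only [List.length_cons] at h
        rw [show List.drop (List.length [x]) (x :: t) = t by simp]
        rw [ih n (new.reverse ++ acc) (by omega)]
        simp [substOne]
      · have : List.isPrefixOf [c] (x :: t) = false := by
          simp [List.isPrefixOf, BEq.beq]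
          intro hh; exact absurd hh.symm hx
        rw [if_neg (by simp [this])]
        simp only [List.length_cons] at h
        rw [ih n (x :: acc) (by omega)]
        simp [substOne, hx]

theorem replace_single (c : Char) (new s : List Char) :
    PySem.Chars.replace s [c] new = s.flatMap (substOne c new) := by
  rw [PySem.Chars.replace, if_neg (by simp)]
  simpa using replace_go_single c new s s.length [] le_rfl

theorem join_nil_eq_flatten (parts : List (List Char)) :
    PySem.Chars.join [] parts = parts.flatten := by
  induction parts with
  | nil => simp [PySem.Chars.join_nil]
  | cons p rest ih =>
    cases rest with
    | nil => simp [PySem.Chars.join_singleton]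
    | cons q r => rw [PySem.Chars.join_cons_cons, ih]; simp

theorem convert_for_list_eq (formula : String) :
    convert_for_list formula = formula.toList.map (fun i => String.ofList [i]) := by
  unfold convert_for_list
  have : ∀ (l : List Char) (acc : List String),
      l.foldl (fun rez i => rez ++ [String.ofList [i]]) acc = acc ++ l.map (fun i => String.ofList [i]) := by
    intro l
    induction l with
    | nil => simp
    | cons x t ih => intro acc; simp [ih]
  simpa using this formula.toList []

-- the fused per-character substitution
def substAll (c : Char) : List Char :=
  if c = '!' then " not ".toList
  else if c = '+' then " or ".toList
  else if c = '*' then " and ".toList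
  else [c]

theorem chain_char (c : Char) :
    ((substOne '!' " not ".toList c).flatMap (substOne '+' " or ".toList)).flatMap
      (substOne '*' " and ".toList) = substAll c := by
  by_cases h1 : c = '!'
  · subst h1; decide
  · by_cases h2 : c = '+'
    · subst h2; decide
    · by_cases h3 : c = '*'
      · subst h3; decide
      · simp [substOne, substAll, h1, h2, h3]

theorem a_toList (formula : String) :
    (handler_input_formula formula).toList = formula.toList.flatMap substAll := by
  unfold handler_input_formula
  rw [convert_for_list_eq, PySem.Str.toList_join,
      show ("" : String).toList = [] by decide, join_nil_eq_flatten]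
  simp only [List.map_map, List.flatten_eq_flatMap, List.flatMap_map]
  congr 1
  funext c
  by_cases h1 : c = '!'
  · subst h1; decide
  · by_cases h2 : c = '+'
    · subst h2; decide
    · by_cases h3 : c = '*'
      · subst h3; decide
      · have e1 : (String.ofList [c] = "!") = False := by
          simp [String.ext_iff]; intro h; exact h1 h
        have e2 : (String.ofList [c] = "+") = False := by
          simp [String.ext_iff]; intro h; exact h2 h
        have e3 : (String.ofList [c] = "*") = False := by
          simp [String.ext_iff]; intro h; exact h3 h
        simp [substAll, e1, e2, e3, h1, h2, h3]

theorem b_toList (formula : String) :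
    (handler_input_formula_alt formula).toList = formula.toList.flatMap substAll := by
  unfold handler_input_formula_alt
  rw [PySem.Str.toList_replace, PySem.Str.toList_replace, PySem.Str.toList_replace]
  rw [show ("!" : String).toList = ['!'] by decide,
      show ("+" : String).toList = ['+'] by decide,
      show ("*" : String).toList = ['*'] by decide]
  rw [replace_single, replace_single, replace_single]
  rw [List.flatMap_assoc, List.flatMap_assoc]
  congr 1
  funext c
  rw [← chain_char c]
  simp [List.flatMap_assoc]

-- ===== VERDICT (by name: the statement is the Claim_ definition above) =====
theorem handler_input_formula_spec : Claim_equal_handler_input_formula := by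
  intro formula _
  unfold Spec_handler_input_formula
  have := (a_toList formula).trans (b_toList formula).symm
  exact String.ext this
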